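-- pv_equiv track=rewrite | github.com/Pransav290302/drop | backend/app/services/pipeline_service.py | _fallback_clustering
-- ===== SOURCE A (Python) =====
-- from typing import Dict, Any, Optional, List
--
-- def _fallback_clustering(products: List[Dict[str, Any]]) -> List[int]:
--     """Generate cluster IDs based on product name similarity"""
--     from collections import defaultdict
--
--     # Simple clustering based on first word of product name
--     clusters = defaultdict(list)
--     for i, p in enumerate(products):
--         name = str(p.get("product_name", "")).lower()
--         first_word = name.split()[0] if name else "unknown"
--         clusters[first_word].append(i)
--
--     # Assign cluster IDs
--     cluster_ids = [None] * len(products)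
--     cluster_id = 0
--     for word, indices in clusters.items():
--         for idx in indices:
--             cluster_ids[idx] = cluster_id
--         cluster_id += 1
--
--     return cluster_ids
-- ===== SOURCE B (Python) =====
-- def _fallback_clustering(products):
--     """Generate cluster IDs based on product name similarity"""
--     # Single streaming pass: assign each product its word's first-appearance id.
--     word_to_id = {}
--     result = []
--     for p in products:
--         name = str(p.get("product_name", "")).lower()
--         first_word = name.split()[0] if name else "unknown"
--         result.append(word_to_id.setdefault(first_word, len(word_to_id)))
--     return result
-- ===== Notes on version B (the rewrite author's own statement) =====
-- stated objective: simpler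
-- what changed: Replaced A's two-phase structure (grouping indices into a defaultdict, then a second loop assigning cluster ids into a preallocated None list) by a single streaming pass that appends word_to_id.setdefault(first_word, len(word_to_id)) for each product.
import Mathlib
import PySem

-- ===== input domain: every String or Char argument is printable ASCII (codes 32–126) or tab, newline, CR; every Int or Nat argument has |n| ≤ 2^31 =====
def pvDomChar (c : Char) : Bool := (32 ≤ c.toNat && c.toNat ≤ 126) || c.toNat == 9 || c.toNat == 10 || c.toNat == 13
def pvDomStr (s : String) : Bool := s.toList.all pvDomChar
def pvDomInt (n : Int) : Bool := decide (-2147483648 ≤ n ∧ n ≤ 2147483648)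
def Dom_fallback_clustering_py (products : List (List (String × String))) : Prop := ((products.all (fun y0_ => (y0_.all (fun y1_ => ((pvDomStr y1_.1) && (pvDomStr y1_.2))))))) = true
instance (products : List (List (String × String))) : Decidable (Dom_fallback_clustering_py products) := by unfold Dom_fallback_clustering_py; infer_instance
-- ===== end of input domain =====

-- B replaces A's two-phase group-then-assign clustering by a single streaming pass
-- (word → id dict built on the fly); same return value, no speed claim.

-- ===== PORT A =====
-- shared helper: the first word of a product's lowercased name, exactly as both
-- Pythons compute it (`name.split()[0] if name else "unknown"`); pyGet? is none
-- exactly where Python raises IndexError — those inputs are outside Pre_ below.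
def pvFirstWord (p : List (String × String)) : String :=
  let name := PySem.Str.lower ((PySem.Dict.ofList p).getD "product_name" "")
  if name = "" then "unknown" else (PySem.List.pyGet? (PySem.Str.split₀ name) 0).getD "unknown"

def fallback_clustering_py (products : List (List (String × String))) : List Int :=
  let clusters : PySem.Dict String (List Int) :=
    (PySem.List.enumerate products).foldl
      (fun d ip => d.modify (pvFirstWord ip.2) [] (· ++ [ip.1])) PySem.Dict.empty
  let init : List (Option Int) := List.replicate products.length none
  let fin := clusters.items.foldl
    (fun (st : List (Option Int) × Int) wi =>
      (wi.2.foldl (fun l idx => l.set idx.toNat (some st.2)) st.1, st.2 + 1))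
    (init, 0)
  -- Python's `[None] * len(products)` cells are all overwritten by ints before the
  -- return; `getD 0` extracts them (never hit on any input, the folds cover every index)
  fin.1.map (fun o => o.getD 0)

-- ===== PORT B =====
def fallback_clustering_py_alt (products : List (List (String × String))) : List Int :=
  (products.foldl
    (fun (st : PySem.Dict String Int × List Int) p =>
      let w := pvFirstWord p
      match st.1.get? w with
      | some id => (st.1, st.2 ++ [id])
      | none => (st.1.insert w (st.1.size : Int), st.2 ++ [(st.1.size : Int)]))
    (PySem.Dict.empty, [])).2

-- ===== PRECONDITION & SPEC =====
-- Pre_ excludes products whose name is non-empty but all whitespace: there BOTH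
-- Pythons raise IndexError on `name.split()[0]` (split() of a whitespace-only
-- string is empty); A returns no value on such inputs.
def Pre_fallback_clustering_py (products : List (List (String × String))) : Prop :=
  ∀ p ∈ products,
    PySem.Str.lower ((PySem.Dict.ofList p).getD "product_name" "") = "" ∨
    PySem.Str.split₀ (PySem.Str.lower ((PySem.Dict.ofList p).getD "product_name" "")) ≠ []
instance (products : List (List (String × String))) : Decidable (Pre_fallback_clustering_py products) := by
  unfold Pre_fallback_clustering_py; infer_instance

def pvWitness_fallback_clustering_py : (List (List (String × String))) :=
  [[("product_name", "Apple pie")], [("product_name", "banana")], [], [("product_name", "APPLE tart")]]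

def Spec_fallback_clustering_py (products : List (List (String × String))) (out : List Int) : Prop :=
  out = fallback_clustering_py_alt products
instance (products : List (List (String × String))) (out : List Int) : Decidable (Spec_fallback_clustering_py products out) := by
  unfold Spec_fallback_clustering_py; infer_instance

-- ===== CLAIM (what is proved, stated in full; the proofs are below) =====
def Claim_equal_fallback_clustering_py : Prop := ∀ (products : List (List (String × String))), Dom_fallback_clustering_py products → Pre_fallback_clustering_py products → Spec_fallback_clustering_py products (fallback_clustering_py products)

-- ===== LEMMAS AND PROOFS =====

theorem pvLenSetFold (l : List Int) (c : Int) (init : List (Option Int)) :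
    (l.foldl (fun a idx => a.set idx.toNat (some c)) init).length = init.length := by
  induction l generalizing init with
  | nil => rfl
  | cons x xs ih => simp [List.foldl_cons, ih]

theorem pvGetSetFold (l : List Int) (c : Int) (init : List (Option Int))
    (hl : ∀ i ∈ l, 0 ≤ i) (j : Nat) :
    (l.foldl (fun a idx => a.set idx.toNat (some c)) init)[j]? =
      if (j : Int) ∈ l ∧ j < init.length then some (some c) else init[j]? := by
  induction l generalizing init with
  | nil => simp
  | cons x xs ih =>
    have hx : 0 ≤ x := hl x (by simp)
    rw [List.foldl_cons, ih _ (fun i hi => hl i (by simp [hi]))]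
    by_cases hj : (j : Int) ∈ xs
    · simp only [List.length_set, hj, true_and, List.mem_cons, or_true]
      by_cases h1 : j < init.length
      · simp [h1]
      · simp only [h1, if_false]
        rw [List.getElem?_set]
        split_ifs with h2 h3
        · omega
        · exact (List.getElem?_eq_none (by omega)).symm
        · rfl
    · simp only [List.length_set, hj, false_and, if_false, List.mem_cons, or_false]
      rw [List.getElem?_set]
      by_cases hxe : x = (j : Int)
      · subst hxe
        simp only [Int.toNat_natCast, true_and]
        split_ifs <;> first | rfl | exact (List.getElem?_eq_none (by omega)).symm
      · have hne : x.toNat ≠ j := by intro h; apply hxe; omega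
        have hne' : ¬((j : Int) = x) := fun h => hxe h.symm
        simp [hne, hne']

theorem pvOuterFold (j : Nat) (items : List (String × List Int)) (init : List (Option Int)) (c0 : Int)
    (hpos : ∀ wi ∈ items, ∀ i ∈ wi.2, 0 ≤ i)
    (huniq : items.countP (fun wi => decide ((j : Int) ∈ wi.2)) ≤ 1) :
    ((items.foldl (fun (st : List (Option Int) × Int) wi =>
        (wi.2.foldl (fun l idx => l.set idx.toNat (some st.2)) st.1, st.2 + 1)) (init, c0)).1)[j]? =
      match items.findIdx? (fun wi => decide ((j : Int) ∈ wi.2)) with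
      | none => init[j]?
      | some k => if j < init.length then some (some (c0 + k)) else none := by
  induction items generalizing init c0 with
  | nil => simp
  | cons wi rest ih =>
    rw [List.foldl_cons, List.findIdx?_cons]
    have hlen : (wi.2.foldl (fun l idx => l.set idx.toNat (some c0)) init).length = init.length :=
      pvLenSetFold _ _ _
    by_cases hp : (j : Int) ∈ wi.2
    · simp only [hp, decide_true, if_pos]
      have hrest0 : rest.countP (fun wi => decide ((j : Int) ∈ wi.2)) = 0 := by
        rw [List.countP_cons] at huniq; simp only [hp, decide_true, decide_false, if_pos, if_neg] at huniq <;> omega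
      have hnone : rest.findIdx? (fun wi => decide ((j : Int) ∈ wi.2)) = none := by
        rw [List.findIdx?_eq_none_iff]
        intro x hx
        have := List.countP_eq_zero.mp hrest0 x hx
        simpa using this
      rw [ih _ _ (fun w hw => hpos w (by simp [hw])) (by simp [hrest0])]
      rw [hnone]
      rw [pvGetSetFold _ _ _ (hpos wi (by simp) ), hlen]
      simp only [hp, true_and]
      split_ifs with h1
      · simp
      · exact List.getElem?_eq_none (by omega)
    · simp only [hp, decide_false, if_neg, Bool.false_eq_true, not_false_iff]
      rw [ih _ _ (fun w hw => hpos w (by simp [hw]))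
          (by rw [List.countP_cons] at huniq; simp only [hp, decide_true, decide_false, if_pos, if_neg] at huniq <;> omega)]
      rw [pvGetSetFold _ _ _ (hpos wi (by simp)), hlen]
      simp only [hp, false_and, if_false]
      cases hfi : rest.findIdx? (fun wi => decide ((j : Int) ∈ wi.2)) with
      | none => simp
      | some k =>
        simp only [Option.map_some]
        split_ifs with h1
        · congr 2; push_cast; ring
        · rfl

theorem pvEnumEq {α : Type} (xs : List α) (k : Nat) :
    PySem.List.enumerate xs (k : Int) = (xs.zipIdx k).map (fun q => ((q.2 : Int), q.1)) := by
  induction xs generalizing k with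
  | nil => simp [PySem.List.enumerate_nil]
  | cons x xs ih =>
    rw [PySem.List.enumerate_cons, List.zipIdx_cons]
    simp only [List.map_cons]
    have h : (k : Int) + 1 = ((k + 1 : Nat) : Int) := by push_cast; ring
    rw [h, ih]

theorem pvEnumEq0 {α : Type} (xs : List α) :
    PySem.List.enumerate xs = (xs.zipIdx).map (fun q => ((q.2 : Int), q.1)) := by
  have := pvEnumEq xs 0
  simpa using this

theorem pvBLoop (l : List (List (String × String))) (d : PySem.Dict String Int)
    (pw : List String) (acc : List Int)
    (hget : ∀ w, d.get? w = (PySem.List.index? (PySem.List.dedup pw) w).map (fun k => (k : Int)))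
    (hsize : d.size = (PySem.List.dedup pw).length) :
    (l.foldl (fun (st : PySem.Dict String Int × List Int) p =>
        let w := pvFirstWord p
        match st.1.get? w with
        | some id => (st.1, st.2 ++ [id])
        | none => (st.1.insert w (st.1.size : Int), st.2 ++ [(st.1.size : Int)])) (d, acc)).2 =
      acc ++ l.map (fun p =>
        (((PySem.List.index? (PySem.List.dedup (pw ++ l.map pvFirstWord)) (pvFirstWord p)).getD 0 : Nat) : Int)) := by
  induction l generalizing d pw acc with
  | nil => simp
  | cons p rest ih =>
    rw [List.foldl_cons]
    simp only [List.map_cons]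
    set w := pvFirstWord p with hw
    by_cases hmem : w ∈ PySem.List.dedup pw
    · -- existing word: dict unchanged
      have hded : PySem.List.dedup (pw ++ [w]) = PySem.List.dedup pw := by
        rw [PySem.List.dedup_eq_ofList, PySem.Set.ofList_append_singleton,
          PySem.Set.add_of_mem (by rwa [PySem.List.dedup_eq_ofList] at hmem),
          ← PySem.List.dedup_eq_ofList]
      obtain ⟨k, hk⟩ : ∃ k, PySem.List.index? (PySem.List.dedup pw) w = some k := by
        cases hidx : PySem.List.index? (PySem.List.dedup pw) w with
        | none => exact absurd ((PySem.List.index?_eq_none_iff _ _).mp hidx) (by simpa using hmem)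
        | some k => exact ⟨k, rfl⟩
      have hg : d.get? w = some (k : Int) := by rw [hget, hk]; rfl
      simp only [hg]
      rw [ih _ _ _ (by intro w'; rw [hget, hded]) (by rw [hsize, hded])]
      have hidxfull : PySem.List.index? (PySem.List.dedup (pw ++ w :: rest.map pvFirstWord)) w = some k := by
        have h1 : pw ++ w :: rest.map pvFirstWord = (pw ++ [w]) ++ rest.map pvFirstWord := by simp
        rw [h1, PySem.List.dedup_eq_ofList, PySem.Set.ofList_append, PySem.Set.update_eq_append_filter,
          PySem.List.index?_append_of_mem _ (by rw [← PySem.List.dedup_eq_ofList, hded]; exact hmem),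
          ← PySem.List.dedup_eq_ofList, hded, hk]
      simp only [List.append_assoc, List.singleton_append, hidxfull]
      simp
    · -- new word: insert with id = size
      have hpw : w ∉ pw := by rwa [PySem.List.mem_dedup] at hmem
      have hnone : d.get? w = none := by
        rw [hget, (PySem.List.index?_eq_none_iff _ _).mpr (by simpa using hmem)]; rfl
      have hcont : d.contains w = false := by rw [PySem.Dict.contains_eq_isSome_get?, hnone]; rfl
      have hded : PySem.List.dedup (pw ++ [w]) = PySem.List.dedup pw ++ [w] := by
        rw [PySem.List.dedup_eq_ofList, PySem.Set.ofList_append_singleton,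
          PySem.Set.add_of_not_mem (by rwa [PySem.List.dedup_eq_ofList] at hmem),
          ← PySem.List.dedup_eq_ofList]
      simp only [hnone]
      have hget' : ∀ w', (d.insert w (d.size : Int)).get? w' =
          (PySem.List.index? (PySem.List.dedup (pw ++ [w])) w').map (fun k => (k : Int)) := by
        intro w'
        rw [PySem.Dict.get?_insert, hded]
        by_cases he : w' = w
        · subst he
          rw [if_pos rfl, PySem.List.index?_append_singleton_self _ _ (by simpa using hmem), hsize]
          rfl
        · have hpw' : w' ∉ PySem.List.dedup pw ++ [w] → True := fun _ => trivial
          rw [if_neg he, hget]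
          by_cases hm' : w' ∈ PySem.List.dedup pw
          · rw [PySem.List.index?_append_of_mem _ hm']
          · rw [(PySem.List.index?_eq_none_iff _ _).mpr hm',
              (PySem.List.index?_eq_none_iff _ _).mpr (by
                simp only [List.mem_append, List.mem_singleton]
                push_neg
                exact ⟨hm', he⟩)]
      have hsize' : (d.insert w (d.size : Int)).size = (PySem.List.dedup (pw ++ [w])).length := by
        rw [PySem.Dict.size_insert, hcont, hded]
        simp [hsize]
      rw [ih _ _ _ hget' hsize']
      have hidxfull : PySem.List.index? (PySem.List.dedup (pw ++ w :: rest.map pvFirstWord)) w =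
          some (PySem.List.dedup pw).length := by
        have h1 : pw ++ w :: rest.map pvFirstWord = (pw ++ [w]) ++ rest.map pvFirstWord := by simp
        rw [h1, PySem.List.dedup_eq_ofList, PySem.Set.ofList_append, PySem.Set.update_eq_append_filter,
          PySem.List.index?_append_of_mem _ (by rw [← PySem.List.dedup_eq_ofList, hded]; simp),
          ← PySem.List.dedup_eq_ofList, hded,
          PySem.List.index?_append_singleton_self _ _ (by simpa using hmem)]
      simp only [List.append_assoc, List.singleton_append, hidxfull, hsize]
      simp

theorem pvBChar (products : List (List (String × String))) :
    fallback_clustering_py_alt products = (products.map pvFirstWord).map (fun w =>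
      (((PySem.List.index? (PySem.List.dedup (products.map pvFirstWord)) w).getD 0 : Nat) : Int)) := by
  simp only [fallback_clustering_py_alt]
  rw [pvBLoop products PySem.Dict.empty [] []
    (by intro w
        rw [PySem.Dict.get?_empty, (PySem.List.index?_eq_none_iff _ _).mpr (by simp [PySem.List.dedup])]
        rfl)
    (by simp [PySem.Dict.size_empty, PySem.List.dedup])]
  simp [List.map_map]

theorem pvAChar (products : List (List (String × String))) :
    fallback_clustering_py products = (products.map pvFirstWord).map (fun w =>
      (((PySem.List.index? (PySem.List.dedup (products.map pvFirstWord)) w).getD 0 : Nat) : Int)) := by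
  simp only [fallback_clustering_py]
  -- rewrite the grouping fold over enumerate as a fold over the (word, index) pair list L
  have hclusters :
      (PySem.List.enumerate products).foldl
        (fun d ip => d.modify (pvFirstWord ip.2) [] (· ++ [ip.1])) PySem.Dict.empty =
      (products.zipIdx.map (fun q => (pvFirstWord q.1, (q.2 : Int)))).foldl
        (fun d p => d.modify p.1 [] (· ++ [p.2])) PySem.Dict.empty := by
    rw [pvEnumEq0, List.foldl_map, List.foldl_map]
  rw [hclusters]
  set L := products.zipIdx.map (fun q => (pvFirstWord q.1, (q.2 : Int))) with hLdef
  set ws := products.map pvFirstWord with hwsdef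
  set clusters := L.foldl (fun d p => d.modify p.1 [] (· ++ [p.2])) PySem.Dict.empty with hcdef
  have hkeys : clusters.keys = PySem.List.dedup ws := by
    rw [hcdef, PySem.Dict.keys_foldl_modify_key L Prod.fst [] (fun _ x v => v ++ [x.2]),
      PySem.Dict.keys_empty, PySem.Set.update_nil_left, PySem.List.dedup_eq_ofList]
    congr 1
    rw [hLdef, List.map_map, hwsdef]
    have : products = products.zipIdx.map Prod.fst := (List.zipIdx_map_fst 0 products).symm
    conv_rhs => rw [this, List.map_map]
    rfl
  have hnodup : clusters.keys.Nodup := by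
    rw [hkeys]; exact PySem.List.nodup_dedup _
  have hF : ∀ w, clusters.getD w [] = (L.filter (fun p => p.1 == w)).map (·.2) := by
    intro w
    rw [hcdef, PySem.Dict.getD_foldl_modify_append, PySem.Dict.getD_empty]
    simp
  have hmemF : ∀ w (i : Int), i ∈ clusters.getD w [] ↔
      ∃ jn : Nat, i = (jn : Int) ∧ ws[jn]? = some w := by
    intro w i
    rw [hF]
    simp only [List.mem_map, List.mem_filter, hLdef]
    constructor
    · rintro ⟨pr, ⟨⟨q, hq, rfl⟩, hflt⟩, hsnd⟩
      simp only [beq_iff_eq] at hflt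
      refine ⟨q.2, by simpa using hsnd.symm, ?_⟩
      rw [hwsdef, List.getElem?_map, (List.mem_zipIdx_iff_getElem?).mp hq]
      simp [hflt]
    · rintro ⟨jn, hi, hjw⟩
      rw [hwsdef, List.getElem?_map] at hjw
      cases hp : products[jn]? with
      | none => rw [hp] at hjw; simp at hjw
      | some prod =>
        rw [hp] at hjw
        simp only [Option.map_some, Option.some_inj] at hjw
        refine ⟨(w, (jn : Int)), ⟨⟨(prod, jn), (List.mem_zipIdx_iff_getElem?).mpr hp, by simp [hjw]⟩, by simp⟩, by simp [hi]⟩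
  have hitems : clusters.items = (PySem.List.dedup ws).map (fun k => (k, clusters.getD k [])) := by
    rw [PySem.Dict.items_eq_map_keys clusters hnodup [], hkeys]
  have hpos : ∀ wi ∈ clusters.items, ∀ i ∈ wi.2, 0 ≤ i := by
    intro wi hwi i hi
    rw [hitems] at hwi
    obtain ⟨k, hk, rfl⟩ := List.mem_map.mp hwi
    obtain ⟨jn, rfl, -⟩ := (hmemF k i).mp hi
    exact Int.natCast_nonneg jn
  apply List.ext_getElem?
  intro j
  rw [List.getElem?_map, List.getElem?_map]
  by_cases hj : j < products.length
  · have hjws : j < ws.length := by simp [hwsdef, hj]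
    have hiff : ∀ k : String, ((j : Int) ∈ clusters.getD k []) ↔ (k = ws[j]'hjws) := by
      intro k
      rw [hmemF]
      constructor
      · rintro ⟨jn, hje, hjw⟩
        have hjj : jn = j := by exact_mod_cast hje.symm
        subst hjj
        rw [List.getElem?_eq_getElem hjws] at hjw
        exact (Option.some_inj.mp hjw).symm
      · rintro rfl
        exact ⟨j, rfl, List.getElem?_eq_getElem hjws⟩
    have hpred : ((fun wi => decide ((j : Int) ∈ wi.2)) ∘ (fun k => (k, clusters.getD k []))) =
        fun k : String => k == ws[j]'hjws := by
      funext k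
      show decide ((j : Int) ∈ clusters.getD k []) = (k == ws[j]'hjws)
      rw [Bool.eq_iff_iff, decide_eq_true_eq, beq_iff_eq]
      exact hiff k
    have huniq : clusters.items.countP (fun wi => decide ((j : Int) ∈ wi.2)) ≤ 1 := by
      rw [hitems, List.countP_map, hpred, ← List.count_eq_countP]
      exact List.nodup_iff_count_le_one.mp (PySem.List.nodup_dedup ws) _
    rw [pvOuterFold j _ _ _ hpos huniq]
    have hfind : clusters.items.findIdx? (fun wi => decide ((j : Int) ∈ wi.2)) =
        PySem.List.index? (PySem.List.dedup ws) (ws[j]'hjws) := by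
      rw [hitems, List.findIdx?_map, hpred, PySem.List.index?_eq_idxOf?]
      rfl
    obtain ⟨k0, hk0⟩ : ∃ k0, PySem.List.index? (PySem.List.dedup ws) (ws[j]'hjws) = some k0 := by
      cases hx : PySem.List.index? (PySem.List.dedup ws) (ws[j]'hjws) with
      | none =>
        exact absurd ((PySem.List.index?_eq_none_iff _ _).mp hx)
          (by simp [PySem.List.mem_dedup, List.getElem_mem])
      | some k0 => exact ⟨k0, rfl⟩
    rw [hfind, hk0]
    simp only [List.length_replicate, hj, if_pos]
    rw [List.getElem?_eq_getElem hjws]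
    have hk0' := hk0
    rw [PySem.List.index?_eq_idxOf?, PySem.List.dedup_eq_ofList] at hk0'
    simp [hk0']
  · have hpredF : ∀ k : String, ¬ ((j : Int) ∈ clusters.getD k []) := by
      intro k hk
      obtain ⟨jn, hje, hjw⟩ := (hmemF k _).mp hk
      have hjj : jn = j := by exact_mod_cast hje.symm
      subst hjj
      rw [List.getElem?_eq_none (by simpa [hwsdef] using Nat.le_of_not_lt hj)] at hjw
      simp at hjw
    have h0 : clusters.items.countP (fun wi => decide ((j : Int) ∈ wi.2)) = 0 := by
      rw [List.countP_eq_zero]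
      intro wi hwi
      rw [hitems] at hwi
      obtain ⟨k, hk, rfl⟩ := List.mem_map.mp hwi
      simpa using hpredF k
    rw [pvOuterFold j _ _ _ hpos (by omega)]
    have hfnone : clusters.items.findIdx? (fun wi => decide ((j : Int) ∈ wi.2)) = none := by
      rw [List.findIdx?_eq_none_iff]
      intro wi hwi
      rw [hitems] at hwi
      obtain ⟨k, hk, rfl⟩ := List.mem_map.mp hwi
      simpa using hpredF k
    rw [hfnone]
    have h1 : (List.replicate products.length (none : Option Int))[j]? = none :=
      List.getElem?_eq_none (by simpa using Nat.le_of_not_lt hj)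
    have h2 : ws[j]? = none :=
      List.getElem?_eq_none (by simpa [hwsdef] using Nat.le_of_not_lt hj)
    rw [h1, h2]
    simp

-- ===== VERDICT (by name: the statement is the Claim_ definition above) =====
theorem fallback_clustering_py_spec : Claim_equal_fallback_clustering_py := by
  intro products _ _
  unfold Spec_fallback_clustering_py
  exact (pvAChar products).trans (pvBChar products).symm
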